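-- pv_equiv track=rewrite | github.com/pypye/LL1_parser | parser/PaserReader.py | parse
-- ===== SOURCE A (Python) =====
-- def parse(string):
--     data = string.split()
--     data_obj = []
--     current_obj = []
--     for x in data:
--         if x == "|":
--             data_obj.append(current_obj)
--             current_obj = []
--         else:
--             current_obj.append(x)
--
--     if len(current_obj) > 0:
--         data_obj.append(current_obj)
--
--     return data_obj
-- ===== SOURCE B (Python) =====
-- def parse(string):
--     # Recursive decomposition: split off the group before the first '|' and recurse
--     # on the rest; a remainder with no '|' is a final group only if non-empty.
--     def go(toks):
--         if "|" not in toks: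
--             return [toks] if toks else []
--         i = toks.index("|")
--         return [toks[:i]] + go(toks[i + 1:])
--     return go(string.split())
-- ===== Notes on version B (the rewrite author's own statement) =====
-- stated objective: alternative
-- what changed: Replaces A's single-pass accumulator loop with a recursive decomposition that finds the first '|' with index() and slices the group off the front, recursing on the remainder.
import Mathlib
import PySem

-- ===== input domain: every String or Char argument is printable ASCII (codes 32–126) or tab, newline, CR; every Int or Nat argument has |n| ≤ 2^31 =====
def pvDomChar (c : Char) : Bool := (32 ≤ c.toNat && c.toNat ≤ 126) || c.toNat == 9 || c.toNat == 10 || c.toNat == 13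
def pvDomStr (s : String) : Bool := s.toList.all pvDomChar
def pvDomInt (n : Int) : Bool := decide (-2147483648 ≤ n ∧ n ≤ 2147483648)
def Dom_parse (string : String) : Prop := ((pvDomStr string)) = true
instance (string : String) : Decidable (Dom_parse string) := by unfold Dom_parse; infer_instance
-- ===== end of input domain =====

-- B recursively splits off the group before the first '|' instead of A's accumulator loop; same cost, different decomposition.

-- ===== PORT A =====
-- for x in data: if x == "|": append current and reset else accumulate
def parseLoop (data : List String) (dataObj : List (List String)) (currentObj : List String) :
    List (List String) × List String :=
  match data with
  | [] => (dataObj, currentObj)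
  | x :: xs =>
    if x = "|" then parseLoop xs (dataObj ++ [currentObj]) []
    else parseLoop xs dataObj (currentObj ++ [x])

def parse (string : String) : List (List String) :=
  let data := PySem.Str.split₀ string
  let p := parseLoop data [] []
  if p.2.length > 0 then p.1 ++ [p.2] else p.1

-- ===== PORT B =====
-- go(toks): no '|' → [toks] if toks else []; otherwise toks[:i] :: go(toks[i+1:])
def parseAltGo (toks : List String) : List (List String) :=
  match h : PySem.List.index? toks "|" with
  | none => if toks.isEmpty then [] else [toks]
  | some i =>
    PySem.List.slice toks none (some (i : Int)) ::
      parseAltGo (PySem.List.slice toks (some ((i + 1 : Nat) : Int)) none)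
termination_by toks.length
decreasing_by
  obtain ⟨hk, -, -⟩ := PySem.List.getElem_of_index?_eq_some h
  rw [PySem.List.slice_from_natCast]
  simp
  omega

def parse_alt (string : String) : List (List String) :=
  parseAltGo (PySem.Str.split₀ string)

-- ===== PRECONDITION & SPEC =====
def Spec_parse (string : String) (out : List (List String)) : Prop := out = parse_alt string
instance (string : String) (out : List (List String)) : Decidable (Spec_parse string out) := by unfold Spec_parse; infer_instance

-- ===== CLAIM (what is proved, stated in full; the proofs are below) =====
def Claim_equal_parse : Prop := ∀ (string : String), Dom_parse string → Spec_parse string (parse string)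

-- ===== LEMMAS AND PROOFS =====

-- prepend cur to the first group (a lone non-empty cur becomes its own group)
def prep (cur : List String) (gs : List (List String)) : List (List String) :=
  match gs with
  | [] => if cur = [] then [] else [cur]
  | g :: rest => (cur ++ g) :: rest

theorem prep_nil (gs : List (List String)) : prep [] gs = gs := by
  cases gs <;> simp [prep]

theorem parseAltGo_nil : parseAltGo [] = [] := by
  rw [parseAltGo.eq_def]
  rfl

theorem parseAltGo_cons_bar (xs : List String) :
    parseAltGo ("|" :: xs) = [] :: parseAltGo xs := by
  have h : PySem.List.index? ("|" :: xs) "|" = some 0 := PySem.List.index?_cons_self ..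
  rw [parseAltGo.eq_def]
  split
  · rename_i h2; rw [h] at h2; cases h2
  · rename_i i h2
    rw [h] at h2
    injection h2 with h3
    subst h3
    have e : ((0 + 1 : Nat) : Int) = ((1 : Nat) : Int) := rfl
    rw [e, PySem.List.slice_from_natCast]
    simp [PySem.List.slice]

theorem parseAltGo_cons_ne (x : String) (xs : List String) (hx : x ≠ "|") :
    parseAltGo (x :: xs) = prep [x] (parseAltGo xs) := by
  have hc : PySem.List.index? (x :: xs) "|" =
      (PySem.List.index? xs "|").map (· + 1) := PySem.List.index?_cons_of_ne _ hx
  rw [parseAltGo.eq_def, parseAltGo.eq_def]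
  cases h : PySem.List.index? xs "|" with
  | none =>
    have h' : PySem.List.index? (x :: xs) "|" = none := by rw [hc, h]; rfl
    split
    · by_cases hxs : xs = []
      · subst hxs; simp [prep]
      · simp [prep, hxs]
    · rename_i i h2; rw [h'] at h2; cases h2
  | some i =>
    have h' : PySem.List.index? (x :: xs) "|" = some (i + 1) := by rw [hc, h]; rfl
    split
    · rename_i h2; rw [h'] at h2; cases h2
    · rename_i j h2
      rw [h'] at h2
      injection h2 with h3
      subst h3
      have e1 : PySem.List.slice (x :: xs) none (some ((i + 1 : Nat) : Int)) =
          x :: PySem.List.slice xs none (some ((i : Nat) : Int)) := by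
        rw [PySem.List.slice_to_natCast, PySem.List.slice_to_natCast]
        simp
      have e2 : PySem.List.slice (x :: xs) (some ((i + 1 + 1 : Nat) : Int)) none =
          PySem.List.slice xs (some ((i + 1 : Nat) : Int)) none := by
        rw [PySem.List.slice_from_natCast, PySem.List.slice_from_natCast]
        rfl
      rw [e1, e2]
      simp [prep]

theorem prep_prep (cur x : List String) (hx : x ≠ []) (gs : List (List String)) :
    prep cur (prep x gs) = prep (cur ++ x) gs := by
  cases gs with
  | nil => simp [prep, hx]
  | cons g rest => simp [prep]

-- A's finishing step applied to the loop's state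
def afin (p : List (List String) × List String) : List (List String) :=
  if p.2.length > 0 then p.1 ++ [p.2] else p.1

-- the loop's result (with the trailing append) equals prep cur of B's recursion
theorem loop_eq_prep (data : List String) :
    ∀ (dataObj : List (List String)) (cur : List String),
      afin (parseLoop data dataObj cur) = dataObj ++ prep cur (parseAltGo data) := by
  induction data with
  | nil =>
    intro dataObj cur
    simp only [parseLoop, parseAltGo_nil, afin, prep]
    by_cases hc : cur = [] <;> simp [hc]
  | cons x xs ih =>
    intro dataObj cur
    by_cases hx : x = "|"
    · subst hx
      have hstep : parseLoop ("|" :: xs) dataObj cur = parseLoop xs (dataObj ++ [cur]) [] := by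
        simp [parseLoop]
      rw [hstep, ih, parseAltGo_cons_bar, prep_nil]
      simp [prep]
    · have hstep : parseLoop (x :: xs) dataObj cur = parseLoop xs dataObj (cur ++ [x]) := by
        simp [parseLoop, hx]
      rw [hstep, ih, parseAltGo_cons_ne x xs hx, prep_prep cur [x] (by simp)]

-- ===== VERDICT (by name: the statement is the Claim_ definition above) =====
theorem parse_spec : Claim_equal_parse := by
  intro string _
  unfold Spec_parse parse parse_alt
  have := loop_eq_prep (PySem.Str.split₀ string) [] []
  simpa [afin, prep_nil] using this
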